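-- pv_equiv track=rewrite | github.com/DaFum/neurotoxic-game | .agents/skills/agents-md-writer/scripts/validate_context_file.py | find_empty_sections
-- ===== SOURCE A (Python) =====
-- def find_empty_sections(lines: list[str]) -> list[tuple[int, str]]:
--     """Find sections with no content between header and next header."""
--     empty = []
--     for i, line in enumerate(lines):
--         stripped = line.strip()
--         if stripped.startswith('#'):
--             # Look ahead for content (skip blank lines)
--             has_content = False
--             for j in range(i + 1, len(lines)):
--                 ahead_stripped = lines[j].strip()
--                 if ahead_stripped.startswith('#'):
--                     break  # Hit next header
--                 if ahead_stripped and not ahead_stripped.startswith('<!--'):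
--                     has_content = True
--                     break
--             if not has_content:
--                 empty.append((i + 1, stripped))
--     return empty
-- ===== SOURCE B (Python) =====
-- def find_empty_sections(lines: list[str]) -> list[tuple[int, str]]:
--     """Single forward pass: track the open header and whether content followed it."""
--     empty = []
--     pending = None  # (line_no, stripped header) of the open section
--     has_content = False
--     for i, line in enumerate(lines):
--         stripped = line.strip()
--         if stripped.startswith('#'):
--             if pending is not None and not has_content:
--                 empty.append(pending)
--             pending = (i + 1, stripped)
--             has_content = False
--         elif stripped and not stripped.startswith('<!--'):
--             has_content = True
--     if pending is not None and not has_content: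
--         empty.append(pending)
--     return empty
-- ===== Notes on version B (the rewrite author's own statement) =====
-- stated objective: simpler
-- what changed: Replaces the per-header inner lookahead loop with a single forward pass that keeps the open header as pending state and a has_content flag, flushing the pending header at the next header or end of input.
import Mathlib
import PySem

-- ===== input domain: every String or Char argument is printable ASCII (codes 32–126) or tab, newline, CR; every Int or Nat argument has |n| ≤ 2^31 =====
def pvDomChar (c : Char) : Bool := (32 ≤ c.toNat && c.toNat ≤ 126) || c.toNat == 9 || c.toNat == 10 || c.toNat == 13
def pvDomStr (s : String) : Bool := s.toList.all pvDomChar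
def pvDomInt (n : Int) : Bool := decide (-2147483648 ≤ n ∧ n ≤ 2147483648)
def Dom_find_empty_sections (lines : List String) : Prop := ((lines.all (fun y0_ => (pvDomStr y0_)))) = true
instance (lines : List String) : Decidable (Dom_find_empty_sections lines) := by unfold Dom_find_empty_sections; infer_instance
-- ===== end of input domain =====

-- B replaces A's per-header inner lookahead loop with a single forward pass keeping the
-- open header as pending state (objective: simpler).

-- ===== PORT A =====
-- A's inner 'for j in range(i+1, len(lines))' loop scans the suffix after line i:
-- returns true iff a content line appears before the next header / end.
def pvLookahead : List String → Bool
  | [] => false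
  | l :: ls =>
    let s := PySem.Str.strip l
    if PySem.Str.startswith s "#" then false
    else if s ≠ "" && !(PySem.Str.startswith s "<!--") then true
    else pvLookahead ls

def pvGoA (i : Int) : List String → List (Int × String)
  | [] => []
  | l :: ls =>
    let s := PySem.Str.strip l
    (if PySem.Str.startswith s "#" && !(pvLookahead ls) then [(i + 1, s)] else [])
      ++ pvGoA (i + 1) ls

def find_empty_sections (lines : List String) : List (Int × String) :=
  pvGoA 0 lines

-- ===== PORT B =====
def pvFlush (pending : Option (Int × String)) (hc : Bool) : List (Int × String) :=
  match pending with
  | some p => if hc then [] else [p]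
  | none => []

def pvGoB (i : Int) (pending : Option (Int × String)) (hc : Bool) :
    List String → List (Int × String)
  | [] => pvFlush pending hc
  | l :: ls =>
    let s := PySem.Str.strip l
    if PySem.Str.startswith s "#" then
      pvFlush pending hc ++ pvGoB (i + 1) (some (i + 1, s)) false ls
    else
      pvGoB (i + 1) pending (hc || (s ≠ "" && !(PySem.Str.startswith s "<!--"))) ls

def find_empty_sections_alt (lines : List String) : List (Int × String) :=
  pvGoB 0 none false lines

-- ===== PRECONDITION & SPEC =====
def Spec_find_empty_sections (lines : List String) (out : List (Int × String)) : Prop := out = find_empty_sections_alt lines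
instance (lines : List String) (out : List (Int × String)) : Decidable (Spec_find_empty_sections lines out) := by unfold Spec_find_empty_sections; infer_instance

-- ===== CLAIM (what is proved, stated in full; the proofs are below) =====
def Claim_equal_find_empty_sections : Prop := ∀ (lines : List String), Dom_find_empty_sections lines → Spec_find_empty_sections lines (find_empty_sections lines)

-- ===== LEMMAS AND PROOFS =====
lemma pvGoB_eq (ls : List String) : ∀ (i : Int) (pending : Option (Int × String)) (hc : Bool),
    pvGoB i pending hc ls =
      pvFlush pending (hc || pvLookahead ls) ++ pvGoA i ls := by
  induction ls with
  | nil =>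
    intro i pending hc
    simp [pvGoB, pvGoA, pvLookahead]
  | cons l ls ih =>
    intro i pending hc
    simp only [pvGoB, pvGoA, pvLookahead]
    by_cases hh : PySem.Str.startswith (PySem.Str.strip l) "#" = true
    · simp only [hh, if_pos, Bool.true_and]
      rw [ih]
      by_cases hl : pvLookahead ls = true <;>
        cases pending <;> cases hc <;>
          simp [pvFlush, hl]
    · simp only [Bool.not_eq_true] at hh
      simp only [hh, Bool.false_and]
      rw [if_neg Bool.false_ne_true, if_neg Bool.false_ne_true, if_neg Bool.false_ne_true, ih]
      cases hB : (decide (PySem.Str.strip l ≠ "") && !PySem.Str.startswith (PySem.Str.strip l) "<!--") <;>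
        simp

theorem pv_main (lines : List String) :
    find_empty_sections lines = find_empty_sections_alt lines := by
  unfold find_empty_sections find_empty_sections_alt
  rw [pvGoB_eq]
  simp [pvFlush]

-- ===== VERDICT (by name: the statement is the Claim_ definition above) =====
theorem find_empty_sections_spec : Claim_equal_find_empty_sections := by
  intro lines _
  unfold Spec_find_empty_sections
  exact pv_main lines
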